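-- pv_equiv track=rewrite | github.com/Hocnonsense/pymummer | pymummer/pair.py | aln2delta
-- ===== SOURCE A (Python) =====
-- def aln2delta(aln1, aln2):
--     muts: list[int] = []
--     ndiff = 0
--     match_base = 0
--     for a, b in zip(aln1, aln2):
--         match_base += 1
--         if a != b:
--             ndiff += 1
--             if a == "-":
--                 muts.append(-match_base)
--             elif b == "-":
--                 muts.append(match_base)
--             else:
--                 continue
--             match_base = 0
--     return muts, ndiff
-- ===== SOURCE B (Python) =====
-- def aln2delta(aln1, aln2):
--     # Pass 1: record absolute 1-based gap positions with their sign, and count diffs.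
--     gaps: list[tuple[int, int]] = []
--     ndiff = 0
--     for idx, (a, b) in enumerate(zip(aln1, aln2), 1):
--         if a != b:
--             ndiff += 1
--             if a == "-":
--                 gaps.append((idx, -1))
--             elif b == "-":
--                 gaps.append((idx, 1))
--     # Pass 2: reduce absolute positions to signed consecutive distances.
--     muts: list[int] = []
--     prev = 0
--     for pos, sign in gaps:
--         muts.append(sign * (pos - prev))
--         prev = pos
--     return muts, ndiff
-- ===== Notes on version B (the rewrite author's own statement) =====
-- stated objective: alternative
-- what changed: Replaces the single fused pass with a resetting running counter by two passes: first an explicit index of absolute 1-based gap positions with signs (plus the diff count), then a reduction of consecutive positions to signed distances.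
import Mathlib
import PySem

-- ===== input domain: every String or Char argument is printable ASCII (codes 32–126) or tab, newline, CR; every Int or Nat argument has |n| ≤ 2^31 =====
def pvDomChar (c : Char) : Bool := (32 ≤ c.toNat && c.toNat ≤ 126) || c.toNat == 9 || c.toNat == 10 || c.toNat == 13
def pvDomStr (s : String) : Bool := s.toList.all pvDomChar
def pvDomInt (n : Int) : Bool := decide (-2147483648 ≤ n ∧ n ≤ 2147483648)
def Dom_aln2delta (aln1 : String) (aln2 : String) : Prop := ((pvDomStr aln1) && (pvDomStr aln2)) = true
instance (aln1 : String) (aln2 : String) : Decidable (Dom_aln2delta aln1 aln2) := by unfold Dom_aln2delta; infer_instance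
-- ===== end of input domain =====

-- B replaces A's fused single pass (running counter reset at each gap) by two passes:
-- build an explicit list of absolute 1-based gap positions with signs, then reduce
-- consecutive positions to signed distances; same O(n) cost (objective: alternative).

-- ===== PORT A =====
-- A's loop: state (muts, ndiff, match_base), match_base incremented each step and reset to 0 after a gap.
def aln2deltaLoopA : List (Char × Char) → List Int → Int → Int → List Int × Int
  | [], muts, ndiff, _ => (muts, ndiff)
  | (a, b) :: rest, muts, ndiff, matchBase =>
    let matchBase := matchBase + 1
    if a ≠ b then
      if a = '-' then aln2deltaLoopA rest (muts ++ [-matchBase]) (ndiff + 1) 0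
      else if b = '-' then aln2deltaLoopA rest (muts ++ [matchBase]) (ndiff + 1) 0
      else aln2deltaLoopA rest muts (ndiff + 1) matchBase
    else aln2deltaLoopA rest muts ndiff matchBase

def aln2delta (aln1 : String) (aln2 : String) : List Int × Int :=
  aln2deltaLoopA (aln1.toList.zip aln2.toList) [] 0 0

-- ===== PORT B =====
-- Pass 1: enumerate(zip(..), 1); collect (absolute position, sign) gap list and the diff count.
def aln2deltaGaps : List (Char × Char) → Int → List (Int × Int) × Int
  | [], _ => ([], 0)
  | (a, b) :: rest, idx =>
    let i := idx + 1
    let (g, nd) := aln2deltaGaps rest i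
    if a ≠ b then
      if a = '-' then ((i, -1) :: g, nd + 1)
      else if b = '-' then ((i, 1) :: g, nd + 1)
      else (g, nd + 1)
    else (g, nd)

-- Pass 2: signed distances between consecutive gap positions, prev starting at 0.
def aln2deltaDists : List (Int × Int) → Int → List Int
  | [], _ => []
  | (pos, sign) :: rest, prev => sign * (pos - prev) :: aln2deltaDists rest pos

def aln2delta_alt (aln1 : String) (aln2 : String) : List Int × Int :=
  let r := aln2deltaGaps (aln1.toList.zip aln2.toList) 0
  (aln2deltaDists r.1 0, r.2)

-- ===== PRECONDITION & SPEC =====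
def Spec_aln2delta (aln1 : String) (aln2 : String) (out : List Int × Int) : Prop := out = aln2delta_alt aln1 aln2
instance (aln1 : String) (aln2 : String) (out : List Int × Int) : Decidable (Spec_aln2delta aln1 aln2 out) := by unfold Spec_aln2delta; infer_instance

-- ===== CLAIM (what is proved, stated in full; the proofs are below) =====
def Claim_equal_aln2delta : Prop := ∀ (aln1 : String) (aln2 : String), Dom_aln2delta aln1 aln2 → Spec_aln2delta aln1 aln2 (aln2delta aln1 aln2)

-- ===== LEMMAS AND PROOFS =====
-- Invariant: A's match_base equals current absolute index minus last gap position.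
theorem aln2delta_key (l : List (Char × Char)) :
    ∀ (idx prev : Int) (muts : List Int) (nd : Int),
      aln2deltaLoopA l muts nd (idx - prev) =
        (muts ++ aln2deltaDists (aln2deltaGaps l idx).1 prev,
         nd + (aln2deltaGaps l idx).2) := by
  induction l with
  | nil => intro idx prev muts nd; simp [aln2deltaLoopA, aln2deltaGaps, aln2deltaDists]
  | cons p rest ih =>
    intro idx prev muts nd
    obtain ⟨a, b⟩ := p
    have h1 : idx - prev + 1 = (idx + 1) - prev := by ring
    have h0 : (0 : Int) = (idx + 1) - (idx + 1) := by ring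
    simp only [aln2deltaLoopA, aln2deltaGaps, h1]
    by_cases hab : a ≠ b
    · rw [if_pos hab, if_pos hab]
      by_cases ha : a = '-'
      · rw [if_pos ha, if_pos ha, h0, ih (idx + 1) (idx + 1) (muts ++ [-(idx + 1 - prev)]) (nd + 1)]
        simp only [aln2deltaDists, List.append_assoc, List.singleton_append, Prod.mk.injEq]
        exact ⟨by ring_nf, by ring⟩
      · rw [if_neg ha, if_neg ha]
        by_cases hb : b = '-'
        · rw [if_pos hb, if_pos hb, h0, ih (idx + 1) (idx + 1) (muts ++ [idx + 1 - prev]) (nd + 1)]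
          simp only [aln2deltaDists, List.append_assoc, List.singleton_append, Prod.mk.injEq]
          exact ⟨by ring_nf, by ring⟩
        · rw [if_neg hb, if_neg hb, ih (idx + 1) prev muts (nd + 1)]
          simp only [Prod.mk.injEq]
          exact ⟨trivial, by ring⟩
    · rw [if_neg hab, if_neg hab, ih (idx + 1) prev muts nd]

-- ===== VERDICT (by name: the statement is the Claim_ definition above) =====
theorem aln2delta_spec : Claim_equal_aln2delta := by
  intro aln1 aln2 _
  unfold Spec_aln2delta aln2delta aln2delta_alt
  have h := aln2delta_key (aln1.toList.zip aln2.toList) 0 0 [] 0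
  simpa using h
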